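-- pv_equiv track=rewrite | github.com/ismail/otobur | ulas2json.py | parseHourList
-- ===== SOURCE A (Python) =====
-- def parseHourList(content):
--     l = list(content)
--     hours = []
--
--     index = 0
--     for character in l:
--         if character.isspace():
--             continue
--
--         try:
--             if len(hours[index]) >= 5:
--                 if character.isdigit():
--                     index += 1
--             hours[index] += character
--         except IndexError:
--             hours.append(character)
--
--     return hours
-- ===== SOURCE B (Python) =====
-- def parseHourList(content):
--     # pass 1: strip all whitespace; pass 2: cut tokens out by jumping 5 chars
--     # ahead and scanning to the next digit, slicing each token out in one go
--     s = "".join(c for c in content if not c.isspace())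
--     hours = []
--     i, n = 0, len(s)
--     while i < n:
--         j = i + 5
--         while j < n and not s[j].isdigit():
--             j += 1
--         hours.append(s[i:j])
--         i = j
--     return hours
-- ===== Notes on version B (the rewrite author's own statement) =====
-- stated objective: faster
-- what changed: Replaces A's single pass that mutates a growing list through an index pointer and try/except IndexError with two staged passes: first strip all whitespace, then extract tokens by jumping 5 characters ahead and scanning for the next digit, slicing each whole token out at once instead of rebuilding it char by char.
import Mathlib
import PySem

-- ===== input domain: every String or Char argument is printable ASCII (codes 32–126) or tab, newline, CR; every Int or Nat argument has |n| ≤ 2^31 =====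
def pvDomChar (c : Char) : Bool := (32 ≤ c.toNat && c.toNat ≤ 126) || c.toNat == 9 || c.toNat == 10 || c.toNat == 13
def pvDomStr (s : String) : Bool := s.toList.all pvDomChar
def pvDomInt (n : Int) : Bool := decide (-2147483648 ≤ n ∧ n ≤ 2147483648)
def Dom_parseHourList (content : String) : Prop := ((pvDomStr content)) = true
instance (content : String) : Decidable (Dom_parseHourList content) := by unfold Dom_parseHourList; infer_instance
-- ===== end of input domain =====

-- B strips whitespace in a first pass, then slices tokens out by jumping 5 chars ahead and
-- scanning for the next digit, instead of A's char-by-char list mutation via an index pointer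
-- and IndexError; a timing run measured B faster (objective: faster).


-- ===== PORT A =====
-- Tokens are kept as List Char while looping (Python strings built char by char) and turned
-- into String at the end.  A's loop state is (hours, index); the try/except IndexError is
-- ported as explicit index-in-range tests at exactly the two places Python can raise:
-- reading hours[index] and writing hours[index] after the increment.
def parseHourListGoA : List Char → List (List Char) → Nat → List (List Char)
  | [], hours, _ => hours
  | c :: rest, hours, index =>
    if PySem.Chars.isspace c then parseHourListGoA rest hours index
    else
      match hours[index]? with
      | none => parseHourListGoA rest (hours ++ [[c]]) index   -- IndexError at len(hours[index]) → append
      | some cur =>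
        let index' := if cur.length ≥ 5 ∧ PySem.Chars.isdigit c then index + 1 else index
        match hours[index']? with
        | none => parseHourListGoA rest (hours ++ [[c]]) index'   -- IndexError at hours[index] += c → append
        | some cur' => parseHourListGoA rest (hours.set index' (cur' ++ [c])) index'

def parseHourList (content : String) : List String :=
  (parseHourListGoA content.toList [] 0).map String.ofList

-- ===== PORT B =====
-- the inner 'while j < n and not s[j].isdigit(): j += 1' scan of Source B
def findDigitIdx : List Char → Nat
  | [] => 0
  | c :: rest => if PySem.Chars.isdigit c then 0 else findDigitIdx rest + 1

-- Source B's outer while loop over index i, ported as structural recursion on the suffix s[i:];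
-- s[i:j] is take 5 plus the scanned stretch up to the next digit.
def parseHourListGoB : List Char → List (List Char)
  | [] => []
  | c :: rest =>
      let head := List.take 5 (c :: rest)
      let tail := List.drop 5 (c :: rest)
      let k := findDigitIdx tail
      (head ++ List.take k tail) :: parseHourListGoB (List.drop k tail)
  termination_by cs => cs.length
  decreasing_by
    simp only [List.length_drop, List.length_cons]
    omega

def parseHourList_alt (content : String) : List String :=
  (parseHourListGoB (content.toList.filter (fun c => !PySem.Chars.isspace c))).map String.ofList

-- ===== PRECONDITION & SPEC =====
def Spec_parseHourList (content : String) (out : List String) : Prop := out = parseHourList_alt content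
instance (content : String) (out : List String) : Decidable (Spec_parseHourList content out) := by unfold Spec_parseHourList; infer_instance

-- ===== CLAIM (what is proved, stated in full; the proofs are below) =====
def Claim_equal_parseHourList : Prop := ∀ (content : String), Dom_parseHourList content → Spec_parseHourList content (parseHourList content)

-- ===== LEMMAS AND PROOFS =====

-- A ignores whitespace characters entirely, so A on cs = A on the whitespace-filtered cs.
theorem goA_filter (cs : List Char) (hours : List (List Char)) (index : Nat) :
    parseHourListGoA cs hours index
      = parseHourListGoA (cs.filter (fun c => !PySem.Chars.isspace c)) hours index := by
  induction cs generalizing hours index with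
  | nil => rfl
  | cons c rest ih =>
    by_cases hsp : PySem.Chars.isspace c
    · simp [parseHourListGoA, hsp, ih]
    · simp only [List.filter_cons, hsp, Bool.not_false, if_pos]
      cases hh : hours[index]? with
      | none => simp [parseHourListGoA, hsp, hh, ih]
      | some cur =>
        by_cases hd : cur.length ≥ 5 ∧ PySem.Chars.isdigit c
        · cases hh2 : hours[index + 1]? with
          | none => simp [parseHourListGoA, hsp, hh, hd, hh2, ih]
          | some cur' => simp [parseHourListGoA, hsp, hh, hd, hh2, ih]
        · simp [parseHourListGoA, hsp, hh, hd, ih]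

-- Mid-level description of finishing the token in progress: extend cur until (len ≥ 5 and digit).
def finishTok : List Char → List Char → List Char × List Char
  | cur, [] => (cur, [])
  | cur, c :: rest =>
    if cur.length ≥ 5 ∧ PySem.Chars.isdigit c then (cur, c :: rest)
    else finishTok (cur ++ [c]) rest

theorem finishTok_snd_le (cur cs : List Char) : (finishTok cur cs).2.length ≤ cs.length := by
  induction cs generalizing cur with
  | nil => simp [finishTok]
  | cons c rest ih =>
    by_cases h : cur.length ≥ 5 ∧ PySem.Chars.isdigit c
    · simp [finishTok, h]
    · simp only [finishTok, h, if_neg, not_false_iff]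
      exact le_trans (ih (cur ++ [c])) (Nat.le_succ _)

-- Mid-level tokenizer: one finishTok per token.
def toks : List Char → List (List Char)
  | [] => []
  | c :: rest => (finishTok [c] rest).1 :: toks (finishTok [c] rest).2
  termination_by cs => cs.length
  decreasing_by
    have := finishTok_snd_le [c] rest
    simp only [List.length_cons]
    omega

-- A's loop, started on a fresh-token state, computes toks (whitespace-free input).
theorem goA_eq_toks_aux (cs : List Char) (hns : ∀ c ∈ cs, ¬ PySem.Chars.isspace c)
    (hB : List (List Char)) (cur : List Char) :
    parseHourListGoA cs (hB ++ [cur]) hB.length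
      = hB ++ ((finishTok cur cs).1 :: toks (finishTok cur cs).2) := by
  induction cs generalizing hB cur with
  | nil => simp [parseHourListGoA, finishTok, toks]
  | cons c rest ih =>
    have hsp : ¬ PySem.Chars.isspace c := hns c (List.mem_cons_self ..)
    have hns' : ∀ c ∈ rest, ¬ PySem.Chars.isspace c := fun x hx => hns x (List.mem_cons_of_mem _ hx)
    by_cases hd : cur.length ≥ 5 ∧ PySem.Chars.isdigit c
    · -- A: index' = index + 1, out of range → append; token boundary
      have hstep : parseHourListGoA (c :: rest) (hB ++ [cur]) hB.length
          = parseHourListGoA rest ((hB ++ [cur]) ++ [[c]]) (hB.length + 1) := by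
        simp [parseHourListGoA, hsp, hd]
      have hlen : (hB ++ [cur]).length = hB.length + 1 := by simp
      rw [hstep]
      have h2 := ih hns' (hB ++ [cur]) [c]
      rw [hlen] at h2
      rw [h2]
      simp [finishTok, toks, hd]
    · -- A: write in place at the same index; token continues
      have hset : (hB ++ [cur]).set hB.length (cur ++ [c]) = hB ++ [cur ++ [c]] := by
        rw [List.set_append_right _ _ (le_refl _)]
        simp
      have hstep : parseHourListGoA (c :: rest) (hB ++ [cur]) hB.length
          = parseHourListGoA rest (hB ++ [cur ++ [c]]) hB.length := by
        simp [parseHourListGoA, hsp, hd, hset]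
      rw [hstep, ih hns' hB (cur ++ [c])]
      simp [finishTok, hd]

theorem goA_eq_toks (cs : List Char) (hns : ∀ c ∈ cs, ¬ PySem.Chars.isspace c) :
    parseHourListGoA cs [] 0 = toks cs := by
  cases cs with
  | nil => simp [parseHourListGoA, toks]
  | cons c rest =>
    have hsp : ¬ PySem.Chars.isspace c := hns c (List.mem_cons_self ..)
    have hns' : ∀ x ∈ rest, ¬ PySem.Chars.isspace x := fun x hx => hns x (List.mem_cons_of_mem _ hx)
    have hstep : parseHourListGoA (c :: rest) [] 0 = parseHourListGoA rest [[c]] 0 := by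
      simp [parseHourListGoA, hsp]
    rw [hstep]
    have h := goA_eq_toks_aux rest hns' [] [c]
    simpa [toks] using h

-- findDigitIdx scans exactly the maximal non-digit prefix.
theorem findDigitIdx_take (l : List Char) :
    List.take (findDigitIdx l) l = l.takeWhile (fun c => !PySem.Chars.isdigit c) := by
  induction l with
  | nil => rfl
  | cons c rest ih =>
    by_cases hd : PySem.Chars.isdigit c
    · simp [findDigitIdx, hd]
    · simp [findDigitIdx, hd, ih]

theorem findDigitIdx_drop (l : List Char) :
    List.drop (findDigitIdx l) l = l.dropWhile (fun c => !PySem.Chars.isdigit c) := by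
  induction l with
  | nil => rfl
  | cons c rest ih =>
    by_cases hd : PySem.Chars.isdigit c
    · simp [findDigitIdx, hd]
    · simp [findDigitIdx, hd, ih]

-- finishTok on a saturated token (length ≥ 5) just scans to the next digit.
theorem finishTok_ge5 (cs : List Char) (cur : List Char) (h : 5 ≤ cur.length) :
    finishTok cur cs
      = (cur ++ cs.takeWhile (fun c => !PySem.Chars.isdigit c),
         cs.dropWhile (fun c => !PySem.Chars.isdigit c)) := by
  induction cs generalizing cur with
  | nil => simp [finishTok]
  | cons c rest ih =>
    by_cases hd : PySem.Chars.isdigit c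
    · simp [finishTok, h, hd]
    · have : ¬ (cur.length ≥ 5 ∧ PySem.Chars.isdigit c) := by simp [hd]
      simp only [finishTok, this, if_neg, not_false_iff]
      rw [ih (cur ++ [c]) (by simp; omega)]
      simp [hd]

-- finishTok on an unsaturated token first takes 5 - |cur| chars unconditionally, then scans.
theorem finishTok_le5 (cs : List Char) (cur : List Char) (h : cur.length ≤ 5) :
    finishTok cur cs
      = (cur ++ cs.take (5 - cur.length)
             ++ (cs.drop (5 - cur.length)).takeWhile (fun c => !PySem.Chars.isdigit c),
         (cs.drop (5 - cur.length)).dropWhile (fun c => !PySem.Chars.isdigit c)) := by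
  induction cs generalizing cur with
  | nil => simp [finishTok]
  | cons c rest ih =>
    by_cases h5 : cur.length = 5
    · rw [finishTok_ge5 (c :: rest) cur (by omega)]
      simp [h5]
    · have hlt : cur.length < 5 := by omega
      have hcond : ¬ (cur.length ≥ 5 ∧ PySem.Chars.isdigit c) := by
        intro hc; omega
      simp only [finishTok, hcond, if_neg, not_false_iff]
      rw [ih (cur ++ [c]) (by simp; omega)]
      have hn : 5 - cur.length = (5 - (cur.length + 1)) + 1 := by omega
      rw [hn]
      simp [List.take_succ_cons, List.drop_succ_cons]

-- The mid-level tokenizer is B's slicing loop.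
theorem toks_eq_goB_aux : ∀ (n : Nat) (cs : List Char), cs.length ≤ n → toks cs = parseHourListGoB cs := by
  intro n
  induction n with
  | zero =>
    intro cs hcs
    have : cs = [] := List.eq_nil_of_length_eq_zero (Nat.le_zero.mp hcs)
    subst this; simp [toks, parseHourListGoB]
  | succ n ih =>
    intro cs hcs
    cases cs with
    | nil => simp [toks, parseHourListGoB]
    | cons c rest =>
      have hft := finishTok_le5 rest [c] (by simp)
      have htake : List.take 5 (c :: rest) = c :: rest.take 4 := by
        simp [List.take_succ_cons]
      have hdrop : List.drop 5 (c :: rest) = rest.drop 4 := by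
        simp [List.drop_succ_cons]
      have hrec : toks ((rest.drop 4).dropWhile (fun c => !PySem.Chars.isdigit c))
          = parseHourListGoB ((rest.drop 4).dropWhile (fun c => !PySem.Chars.isdigit c)) := by
        apply ih
        have h1 : ((rest.drop 4).dropWhile (fun c => !PySem.Chars.isdigit c)).length
            ≤ (rest.drop 4).length := List.length_dropWhile_le ..
        have h2 : (rest.drop 4).length ≤ rest.length := by simp
        simp only [List.length_cons] at hcs
        omega
      simp only [toks, parseHourListGoB, htake, hdrop, findDigitIdx_take, findDigitIdx_drop, hft]
      simp [hrec]

theorem toks_eq_goB (cs : List Char) : toks cs = parseHourListGoB cs :=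
  toks_eq_goB_aux cs.length cs (le_refl _)

-- ===== VERDICT (by name: the statement is the Claim_ definition above) =====
theorem parseHourList_spec : Claim_equal_parseHourList := by
  intro content _
  unfold Spec_parseHourList parseHourList parseHourList_alt
  rw [goA_filter]
  rw [goA_eq_toks _ (by intro c hc; simp only [List.mem_filter] at hc; simpa using hc.2)]
  rw [toks_eq_goB]
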